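-- pv_equiv track=rewrite | github.com/agairola/life-skills | skills/air-quality/scripts/air_quality.py | determine_overall_category
-- ===== SOURCE A (Python) =====
-- CATEGORY_ORDER = ["Good", "Fair", "Poor", "Very Poor", "Extremely Poor", "Hazardous"]
--
-- def _normalize_category(cat: str) -> str:
--     """Normalize AQI category from API (e.g., 'GOOD' → 'Good')."""
--     if not cat:
--         return ""
--     cat_lower = cat.strip().lower()
--     for c in CATEGORY_ORDER:
--         if c.lower() == cat_lower:
--             return c
--     return cat.title()
--
-- def determine_overall_category(readings: list[dict]) -> str:
--     """Determine the worst AQI category across all readings."""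
--     worst_idx = 0
--     for reading in readings:
--         cat = _normalize_category(reading.get("category", ""))
--         reading["category"] = cat  # normalize in-place for output
--         if cat in CATEGORY_ORDER:
--             idx = CATEGORY_ORDER.index(cat)
--             if idx > worst_idx:
--                 worst_idx = idx
--     return CATEGORY_ORDER[worst_idx] if readings else "Good"
-- ===== SOURCE B (Python) =====
-- CATEGORY_ORDER = ["Good", "Fair", "Poor", "Very Poor", "Extremely Poor", "Hazardous"]
--
-- _CANON = {c.lower(): c for c in CATEGORY_ORDER}
--
-- def _canonical(cat: str) -> str:
--     """Canonical AQI category via a lowercase lookup table."""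
--     if not cat:
--         return ""
--     hit = _CANON.get(cat.strip().lower())
--     return hit if hit is not None else cat.title()
--
-- def determine_overall_category(readings: list[dict]) -> str:
--     """Determine the worst AQI category across all readings."""
--     present = set()
--     for reading in readings:
--         cat = _canonical(reading.get("category", ""))
--         reading["category"] = cat  # normalize in-place for output
--         present.add(cat)
--     for c in reversed(CATEGORY_ORDER):
--         if c in present:
--             return c
--     return "Good"
-- ===== Notes on version B (the rewrite author's own statement) =====
-- stated objective: alternative
-- what changed: B replaces A's running max-index scan with one pass that normalizes via a precomputed lowercase->canonical dict and collects the set of categories present, then scans the fixed severity order worst-first and returns the first category present (default 'Good').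
import Mathlib
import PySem

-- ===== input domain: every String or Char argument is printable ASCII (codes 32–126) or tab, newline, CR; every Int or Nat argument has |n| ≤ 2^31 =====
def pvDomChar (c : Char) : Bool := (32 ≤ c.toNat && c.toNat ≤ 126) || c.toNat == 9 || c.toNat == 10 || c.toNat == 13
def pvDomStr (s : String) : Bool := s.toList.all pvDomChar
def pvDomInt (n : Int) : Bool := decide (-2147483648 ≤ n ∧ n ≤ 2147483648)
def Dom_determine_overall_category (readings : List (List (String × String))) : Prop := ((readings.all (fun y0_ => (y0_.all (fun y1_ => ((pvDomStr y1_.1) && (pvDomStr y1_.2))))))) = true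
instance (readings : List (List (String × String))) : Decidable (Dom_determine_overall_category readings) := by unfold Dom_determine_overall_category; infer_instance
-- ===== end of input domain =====

-- B builds a lowercase->canonical lookup table and the set of categories present in one pass,
-- then scans the severity order worst-first; equivalence is about the RETURN value only
-- (Python A and B both normalize reading["category"] in place identically).


-- ===== PORT A =====
def CATEGORY_ORDER : List String := ["Good", "Fair", "Poor", "Very Poor", "Extremely Poor", "Hazardous"]

-- str.title(): uppercase a letter following a non-letter, lowercase a letter following a letter (exact on ASCII).
def pyTitleGo (prevAlpha : Bool) (cs : List Char) : List Char :=
  match cs with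
  | [] => []
  | c :: rest =>
    (if PySem.Chars.isalpha c then
       (if prevAlpha then PySem.Chars.lowerChar c else PySem.Chars.upperChar c)
     else c) :: pyTitleGo (PySem.Chars.isalpha c) rest

def pyTitle (s : String) : String := String.ofList (pyTitleGo false s.toList)

-- _normalize_category
def normCat (cat : String) : String :=
  if cat == "" then ""
  else
    let cat_lower := PySem.Str.lower (PySem.Str.strip cat)
    match CATEGORY_ORDER.find? (fun c => PySem.Str.lower c == cat_lower) with
    | some c => c
    | none => pyTitle cat

-- reading.get("category", "")
def readCat (r : List (String × String)) : String := (PySem.Dict.ofList r).getD "category" ""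

def determine_overall_category (readings : List (List (String × String))) : String :=
  let worst_idx := readings.foldl (fun worst_idx reading =>
    let cat := normCat (readCat reading)
    if CATEGORY_ORDER.contains cat then
      match PySem.List.index? CATEGORY_ORDER cat with
      | some idx => if idx > worst_idx then idx else worst_idx
      | none => worst_idx
    else worst_idx) 0
  if readings ≠ [] then CATEGORY_ORDER.getD worst_idx "" else "Good"

-- ===== PORT B =====
-- _CANON = {c.lower(): c for c in CATEGORY_ORDER}
def canonTable : PySem.Dict String String :=
  PySem.Dict.ofList (CATEGORY_ORDER.map (fun c => (PySem.Str.lower c, c)))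

-- str.title() for B, as a single left fold carrying (previous-char-is-alpha, output)
def titleFold (s : String) : String :=
  String.ofList ((s.toList.foldl (fun (st : Bool × List Char) c =>
    (PySem.Chars.isalpha c,
     st.2 ++ [if PySem.Chars.isalpha c then
                (if st.1 then PySem.Chars.lowerChar c else PySem.Chars.upperChar c)
              else c])) (false, [])).2)

-- _canonical
def canonical (cat : String) : String :=
  if cat == "" then ""
  else
    match canonTable.get? (PySem.Str.lower (PySem.Str.strip cat)) with
    | some hit => hit
    | none => titleFold cat

-- 'for c in reversed(CATEGORY_ORDER): if c in present: return c' / 'return "Good"'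
def firstPresent (order : List String) (present : PySem.Set String) : String :=
  match order with
  | [] => "Good"
  | c :: rest => if PySem.Set.contains present c then c else firstPresent rest present

def determine_overall_category_alt (readings : List (List (String × String))) : String :=
  let present := readings.foldl (fun s reading =>
    PySem.Set.add s (canonical ((PySem.Dict.ofList reading).getD "category" ""))) PySem.Set.empty
  firstPresent CATEGORY_ORDER.reverse present

-- ===== PRECONDITION & SPEC =====
def Spec_determine_overall_category (readings : List (List (String × String))) (out : String) : Prop := out = determine_overall_category_alt readings
instance (readings : List (List (String × String))) (out : String) : Decidable (Spec_determine_overall_category readings out) := by unfold Spec_determine_overall_category; infer_instance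

-- ===== CLAIM (what is proved, stated in full; the proofs are below) =====
def Claim_equal_determine_overall_category : Prop := ∀ (readings : List (List (String × String))), Dom_determine_overall_category readings → Spec_determine_overall_category readings (determine_overall_category readings)

-- ===== LEMMAS AND PROOFS =====

-- B's two pieces agree with A's helpers ------------------------------------

lemma titleFold_go (cs : List Char) (b : Bool) (acc : List Char) :
    (cs.foldl (fun (st : Bool × List Char) c =>
      (PySem.Chars.isalpha c,
       st.2 ++ [if PySem.Chars.isalpha c then
                  (if st.1 then PySem.Chars.lowerChar c else PySem.Chars.upperChar c)
                else c])) (b, acc)).2 = acc ++ pyTitleGo b cs := by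
  induction cs generalizing b acc with
  | nil => simp [pyTitleGo]
  | cons c rest ih => simp [pyTitleGo, ih]

lemma titleFold_eq (s : String) : titleFold s = pyTitle s := by
  simp [titleFold, pyTitle, titleFold_go]

lemma canonTable_get? (k : String) :
    canonTable.get? k = CATEGORY_ORDER.find? (fun c => PySem.Str.lower c == k) := by
  have h1 : PySem.Str.lower "Good" = "good" := by decide
  have h2 : PySem.Str.lower "Fair" = "fair" := by decide
  have h3 : PySem.Str.lower "Poor" = "poor" := by decide
  have h4 : PySem.Str.lower "Very Poor" = "very poor" := by decide
  have h5 : PySem.Str.lower "Extremely Poor" = "extremely poor" := by decide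
  have h6 : PySem.Str.lower "Hazardous" = "hazardous" := by decide
  have hc : canonTable = PySem.Dict.mk [("good", "Good"), ("fair", "Fair"), ("poor", "Poor"),
      ("very poor", "Very Poor"), ("extremely poor", "Extremely Poor"),
      ("hazardous", "Hazardous")] := by decide
  rw [hc]
  simp only [CATEGORY_ORDER, List.find?, h1, h2, h3, h4, h5, h6,
    PySem.Dict.get?_mk_cons]
  cases "good" == k <;> cases "fair" == k <;> cases "poor" == k <;>
    cases "very poor" == k <;> cases "extremely poor" == k <;>
    cases "hazardous" == k <;> rfl

lemma canonical_eq (cat : String) : canonical cat = normCat cat := by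
  unfold canonical normCat
  rw [canonTable_get?, titleFold_eq]

-- rank of a category: its index in CATEGORY_ORDER, 0 for anything unrecognized
def rank (c : String) : Nat := (PySem.List.index? CATEGORY_ORDER c).getD 0

lemma step_eq (w : Nat) (cat : String) :
    (if CATEGORY_ORDER.contains cat then
      match PySem.List.index? CATEGORY_ORDER cat with
      | some idx => if idx > w then idx else w
      | none => w
    else w) = max w (rank cat) := by
  by_cases hmem : cat ∈ CATEGORY_ORDER
  · rcases Option.isSome_iff_exists.mp ((PySem.List.index?_isSome_iff CATEGORY_ORDER cat).mpr hmem) with ⟨i, hi⟩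
    rw [PySem.List.index?_eq_idxOf?] at hi
    simp [hmem, hi, rank, Nat.max_def]
    split_ifs <;> omega
  · have hn : PySem.List.index? CATEGORY_ORDER cat = none :=
      (PySem.List.index?_eq_none_iff _ _).mpr hmem
    rw [PySem.List.index?_eq_idxOf?] at hn
    simp [hmem, hn, rank]

lemma le_foldl_max (l : List Nat) (a : Nat) : a ≤ l.foldl max a := by
  induction l generalizing a with
  | nil => simp
  | cons x xs ih => exact le_trans (Nat.le_max_left a x) (ih (max a x))

lemma mem_le_foldl_max (l : List Nat) (a r : Nat) (h : r ∈ l) : r ≤ l.foldl max a := by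
  induction l generalizing a with
  | nil => simp at h
  | cons x xs ih =>
    rcases List.mem_cons.mp h with h | h
    · subst h; exact le_trans (Nat.le_max_right a r) (le_foldl_max xs (max a r))
    · exact ih (max a x) h

lemma foldl_max_cases (l : List Nat) (a : Nat) : l.foldl max a = a ∨ l.foldl max a ∈ l := by
  induction l generalizing a with
  | nil => simp
  | cons x xs ih =>
    rcases ih (max a x) with h | h
    · rcases max_choice a x with hm | hm
      · left; simp only [List.foldl_cons]; rw [h, hm]
      · right; simp only [List.foldl_cons]; rw [h, hm]; exact List.mem_cons_self
    · right; exact List.mem_cons_of_mem _ h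

lemma rank_le_five (c : String) : rank c ≤ 5 := by
  unfold rank
  cases h : PySem.List.index? CATEGORY_ORDER c with
  | none => simp
  | some i =>
    rcases PySem.List.getElem_of_index?_eq_some h with ⟨hk, _, _⟩
    have : i < 6 := by simpa [CATEGORY_ORDER] using hk
    simpa using Nat.lt_succ_iff.mp this

lemma eq_getD_of_rank (c : String) (m : Nat) (hm : m ≠ 0) (h : rank c = m) :
    c = CATEGORY_ORDER.getD m "" := by
  unfold rank at h
  cases hi : PySem.List.index? CATEGORY_ORDER c with
  | none => rw [hi] at h; simp at h; omega
  | some i =>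
    rw [hi] at h; simp at h; subst h
    rcases PySem.List.getElem_of_index?_eq_some hi with ⟨hk, hget, _⟩
    rw [← hget]; exact (List.getD_eq_getElem _ _ hk).symm

lemma contains_ofList_eq (cats : List String) (c : String) :
    PySem.Set.contains (PySem.Set.ofList cats) c = decide (c ∈ cats) := by
  by_cases h : c ∈ cats <;>
    simp [PySem.Set.contains, PySem.Set.mem_ofList, h]

lemma foldl_funext {α β : Type} (f g : β → α → β) (h : ∀ b a, f b a = g b a)
    (l : List α) (b : β) : l.foldl f b = l.foldl g b := by
  have : f = g := funext fun b => funext (h b)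
  rw [this]

-- B's reverse scan, read as find? over the reversed severity list
lemma firstPresent_eq_find? (order : List String) (s : PySem.Set String) :
    firstPresent order s
      = match order.find? (fun c => PySem.Set.contains s c) with
        | some c => c
        | none => "Good" := by
  induction order with
  | nil => rfl
  | cons c rest ih =>
    by_cases h : c ∈ s <;>
      simp [firstPresent, List.find?, PySem.Set.contains, h, ih]

-- B's one-pass set accumulation is set(map canonical readings)
lemma present_eq_ofList (readings : List (List (String × String))) :
    readings.foldl (fun s reading =>
        PySem.Set.add s (canonical ((PySem.Dict.ofList reading).getD "category" ""))) PySem.Set.empty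
      = PySem.Set.ofList (readings.map (fun r => normCat (readCat r))) := by
  have hmap : readings.map (fun r => normCat (readCat r))
      = readings.map (fun r => canonical ((PySem.Dict.ofList r).getD "category" "")) := by
    apply List.map_congr_left; intro r _; rw [canonical_eq]; rfl
  rw [hmap, PySem.Set.ofList_eq_foldl, List.foldl_map]
  rfl

-- the heart: A's max-rank readout equals B's worst-first scan of the severity list
lemma core (cats : List String) :
    (if cats ≠ [] then CATEGORY_ORDER.getD ((cats.map rank).foldl max 0) "" else "Good")
      = match CATEGORY_ORDER.reverse.find? (fun c => PySem.Set.contains (PySem.Set.ofList cats) c) with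
        | some c => c
        | none => "Good" := by
  have hrev : CATEGORY_ORDER.reverse = ["Hazardous", "Extremely Poor", "Very Poor", "Poor", "Fair", "Good"] := by decide
  by_cases hnil : cats = []
  · subst hnil; simp [hrev, List.find?]
  · obtain ⟨m, hm⟩ : ∃ m, (cats.map rank).foldl max 0 = m := ⟨_, rfl⟩
    have hub : ∀ c ∈ cats, rank c ≤ m :=
      fun c hc => hm ▸ mem_le_foldl_max _ _ _ (List.mem_map_of_mem hc)
    have hnotmem : ∀ c : String, m < rank c → c ∉ cats :=
      fun c hlt hc => absurd (hub c hc) (by omega)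
    have hmem : m ≠ 0 → CATEGORY_ORDER.getD m "" ∈ cats := by
      intro h0
      rcases foldl_max_cases (cats.map rank) 0 with h | h
      · rw [hm] at h; omega
      · rw [hm] at h
        rcases List.mem_map.mp h with ⟨c, hc, hrc⟩
        rwa [← eq_getD_of_rank c m h0 hrc]
    have hle : m ≤ 5 := by
      rcases foldl_max_cases (cats.map rank) 0 with h | h
      · rw [hm] at h; omega
      · rw [hm] at h
        rcases List.mem_map.mp h with ⟨c, _, hrc⟩
        rw [← hrc]; exact rank_le_five c
    rw [hm]
    simp only [hnil, ne_eq, not_false_iff, if_true, hrev, List.find?, contains_ofList_eq]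
    interval_cases m
    · have h5 := hnotmem "Hazardous" (by decide)
      have h4 := hnotmem "Extremely Poor" (by decide)
      have h3 := hnotmem "Very Poor" (by decide)
      have h2 := hnotmem "Poor" (by decide)
      have h1 := hnotmem "Fair" (by decide)
      by_cases hg : "Good" ∈ cats <;> simp [h5, h4, h3, h2, h1, hg, CATEGORY_ORDER]
    · have h5 := hnotmem "Hazardous" (by decide)
      have h4 := hnotmem "Extremely Poor" (by decide)
      have h3 := hnotmem "Very Poor" (by decide)
      have h2 := hnotmem "Poor" (by decide)
      have h1 : "Fair" ∈ cats := by simpa [CATEGORY_ORDER] using hmem (by decide)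
      simp [h5, h4, h3, h2, h1, CATEGORY_ORDER]
    · have h5 := hnotmem "Hazardous" (by decide)
      have h4 := hnotmem "Extremely Poor" (by decide)
      have h3 := hnotmem "Very Poor" (by decide)
      have h2 : "Poor" ∈ cats := by simpa [CATEGORY_ORDER] using hmem (by decide)
      simp [h5, h4, h3, h2, CATEGORY_ORDER]
    · have h5 := hnotmem "Hazardous" (by decide)
      have h4 := hnotmem "Extremely Poor" (by decide)
      have h3 : "Very Poor" ∈ cats := by simpa [CATEGORY_ORDER] using hmem (by decide)
      simp [h5, h4, h3, CATEGORY_ORDER]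
    · have h5 := hnotmem "Hazardous" (by decide)
      have h4 : "Extremely Poor" ∈ cats := by simpa [CATEGORY_ORDER] using hmem (by decide)
      simp [h5, h4, CATEGORY_ORDER]
    · have h5 : "Hazardous" ∈ cats := by simpa [CATEGORY_ORDER] using hmem (by decide)
      simp [h5, CATEGORY_ORDER]

-- ===== VERDICT (by name: the statement is the Claim_ definition above) =====
theorem determine_overall_category_spec : Claim_equal_determine_overall_category := by
  intro readings _
  show determine_overall_category readings = determine_overall_category_alt readings
  simp only [determine_overall_category, determine_overall_category_alt]
  rw [present_eq_ofList, firstPresent_eq_find?]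
  have key : readings.foldl (fun w r =>
      if CATEGORY_ORDER.contains (normCat (readCat r)) then
        match PySem.List.index? CATEGORY_ORDER (normCat (readCat r)) with
        | some idx => if idx > w then idx else w
        | none => w
      else w) 0
      = ((readings.map (fun r => normCat (readCat r))).map rank).foldl max 0 := by
    rw [foldl_funext _ _ (fun w r => step_eq w (normCat (readCat r))) readings 0,
        List.map_map, List.foldl_map]
    rfl
  have hc := core (readings.map (fun r => normCat (readCat r)))
  by_cases h : readings = []
  · subst h; rfl
  · rw [if_pos (show readings.map (fun r => normCat (readCat r)) ≠ [] by simpa using h)] at hc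
    rw [if_pos h, key]
    exact hc
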